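-- pv_equiv track=rewrite | github.com/MADtest/AutotestCourse | Lesson 2 HW/evil-or-odious.py | evil
-- ===== SOURCE A (Python) =====
-- def evil(n):
--     r = 0
--     for i in bin(n)[2:]:
--         if i == '1':
--             r += 1
--     if r & 1:
--         return "It's Odious!"
--     else:
--         return "It's Evil!"
-- ===== SOURCE B (Python) =====
-- def evil(n):
--     m = n if n >= 0 else -n
--     r = 0
--     while m:
--         r ^= 1
--         m &= m - 1
--     return "It's Odious!" if r else "It's Evil!"
-- ===== Notes on version B (the rewrite author's own statement) =====
-- stated objective: alternative
-- what changed: B drops the bin()-string construction and per-digit scan entirely and uses Brian Kernighan's bit-clearing loop (m &= m - 1) on the magnitude, iterating once per SET bit and flipping a parity flag, instead of visiting every binary digit.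
import Mathlib
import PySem

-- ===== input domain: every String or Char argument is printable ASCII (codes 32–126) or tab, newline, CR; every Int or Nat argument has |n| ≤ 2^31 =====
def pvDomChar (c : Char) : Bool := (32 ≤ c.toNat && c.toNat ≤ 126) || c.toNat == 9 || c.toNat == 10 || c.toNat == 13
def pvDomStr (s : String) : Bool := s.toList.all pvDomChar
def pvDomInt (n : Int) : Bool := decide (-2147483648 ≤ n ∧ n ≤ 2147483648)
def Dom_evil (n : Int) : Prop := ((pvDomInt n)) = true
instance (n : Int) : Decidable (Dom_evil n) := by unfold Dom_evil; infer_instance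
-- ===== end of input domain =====

-- B replaces A's bin()-string construction and per-digit scan by Brian Kernighan's
-- bit-clearing loop (m &= m-1) on the magnitude, iterating once per set bit (same cost class).


-- ===== PORT A =====
-- binary digits of a positive magnitude, most significant first (exact: the digits Python's bin() prints)
def pvBinDigits (m : Nat) : List Char :=
  if h : m = 0 then [] else
    pvBinDigits (m / 2) ++ [if m % 2 == 1 then '1' else '0']
termination_by m
decreasing_by exact Nat.div_lt_self (Nat.pos_of_ne_zero h) one_lt_two

-- exact model of Python's bin(n): '-0b…' for negatives, '0b0' for zero
def pvBin (n : Int) : List Char :=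
  (if n < 0 then ['-', '0', 'b'] else ['0', 'b']) ++
  (if n.natAbs = 0 then ['0'] else pvBinDigits n.natAbs)

-- for i in bin(n)[2:]: if i == '1': r += 1   (slice [2:] on a string = drop 2, exact)
def evil (n : Int) : String :=
  if ((pvBin n).drop 2).foldl (fun r i => if i == '1' then r + 1 else r) 0 &&& 1 ≠ 0
  then "It's Odious!" else "It's Evil!"

-- ===== PORT B =====
-- while m: r ^= 1; m &= m - 1   (Kernighan: one iteration per set bit)
def pvKernighan (m r : Nat) : Nat :=
  if h : m = 0 then r else pvKernighan (m &&& (m - 1)) (r ^^^ 1)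
termination_by m
decreasing_by
  exact Nat.lt_of_le_of_lt Nat.and_le_right (by omega)

def evil_alt (n : Int) : String :=
  if pvKernighan (if n ≥ 0 then n else -n).natAbs 0 ≠ 0
  then "It's Odious!" else "It's Evil!"

-- ===== PRECONDITION & SPEC =====
def Spec_evil (n : Int) (out : String) : Prop := out = evil_alt n
instance (n : Int) (out : String) : Decidable (Spec_evil n out) := by unfold Spec_evil; infer_instance

-- ===== CLAIM (what is proved, stated in full; the proofs are below) =====
def Claim_equal_evil : Prop := ∀ (n : Int), Dom_evil n → Spec_evil n (evil n)

-- ===== LEMMAS AND PROOFS =====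

theorem bits_cons (m : Nat) (h : m ≠ 0) :
    Nat.bits m = decide (m % 2 = 1) :: Nat.bits (m / 2) := by
  rcases Nat.mod_two_eq_zero_or_one m with h2 | h2
  · have hm : 2 * (m / 2) = m := by omega
    have hb : Nat.bits (2 * (m / 2)) = false :: Nat.bits (m / 2) :=
      Nat.bit0_bits _ (by omega)
    rw [h2]
    simp only [decide_eq_true_eq, Nat.zero_ne_one, decide_false]
    rw [← hb, hm]
  · have hm : 2 * (m / 2) + 1 = m := by omega
    have hb : Nat.bits (2 * (m / 2) + 1) = true :: Nat.bits (m / 2) :=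
      Nat.bit1_bits _
    rw [h2]
    simp only [decide_true]
    rw [← hb, hm]

theorem foldl_count_ones (l : List Char) (r : Nat) :
    l.foldl (fun r i => if i == '1' then r + 1 else r) r = r + l.count '1' := by
  induction l generalizing r with
  | nil => simp
  | cons c t ih =>
    simp only [List.foldl_cons, List.count_cons, ih]
    by_cases h : c = '1' <;> simp [h, beq_iff_eq] <;> omega

theorem count_binDigits (m : Nat) :
    (pvBinDigits m).count '1' = (Nat.bits m).count true := by
  induction m using Nat.strong_induction_on with
  | _ m ih =>
    by_cases h : m = 0
    · simp [h, pvBinDigits]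
    · rw [pvBinDigits, dif_neg h, bits_cons m h]
      have hd : m / 2 < m := Nat.div_lt_self (Nat.pos_of_ne_zero h) one_lt_two
      rcases Nat.mod_two_eq_zero_or_one m with h2 | h2 <;>
        simp [List.count_append, h2, ih _ hd]

theorem and_pred_odd (m : Nat) (h : m % 2 = 1) : m &&& (m - 1) = m - 1 := by
  apply Nat.eq_of_testBit_eq
  intro i
  cases i with
  | zero => simp [Nat.testBit_zero]; omega
  | succ i =>
    rw [Nat.testBit_and, Nat.testBit_add_one, Nat.testBit_add_one]
    have : (m - 1) / 2 = m / 2 := by omega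
    rw [this, Bool.and_self]

theorem and_pred_even (m : Nat) (h : m % 2 = 0) :
    m &&& (m - 1) = 2 * ((m / 2) &&& (m / 2 - 1)) := by
  apply Nat.eq_of_testBit_eq
  intro i
  cases i with
  | zero => simp [Nat.testBit_zero]; omega
  | succ i =>
    rw [Nat.testBit_and, Nat.testBit_add_one, Nat.testBit_add_one, Nat.testBit_add_one]
    have h1 : (m - 1) / 2 = m / 2 - 1 := by omega
    have h2 : 2 * (m / 2 &&& (m / 2 - 1)) / 2 = m / 2 &&& (m / 2 - 1) := by omega
    rw [h1, h2, Nat.testBit_and]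

theorem countbits_two_mul (x : Nat) :
    (Nat.bits (2 * x)).count true = (Nat.bits x).count true := by
  by_cases h : x = 0
  · simp [h]
  · rw [Nat.bit0_bits _ h]; simp

theorem countbits_and_pred (m : Nat) (h : m ≠ 0) :
    (Nat.bits (m &&& (m - 1))).count true + 1 = (Nat.bits m).count true := by
  induction m using Nat.strong_induction_on with
  | _ m ih =>
    rcases Nat.mod_two_eq_zero_or_one m with h2 | h2
    · have hk : m / 2 ≠ 0 := by omega
      have hd : m / 2 < m := Nat.div_lt_self (Nat.pos_of_ne_zero h) one_lt_two
      rw [and_pred_even m h2, countbits_two_mul, ih _ hd hk]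
      conv_rhs => rw [bits_cons m h]
      simp [h2]
    · rw [and_pred_odd m h2]
      have hm : m - 1 = 2 * (m / 2) := by omega
      rw [hm, countbits_two_mul]
      conv_rhs => rw [bits_cons m h]
      simp [h2]

theorem kernighan_eq (m : Nat) : ∀ r, r ≤ 1 →
    pvKernighan m r = (r + (Nat.bits m).count true) % 2 := by
  induction m using Nat.strong_induction_on with
  | _ m ih =>
    intro r hr
    by_cases h : m = 0
    · rw [h, pvKernighan]; simp; omega
    · rw [pvKernighan, dif_neg h]
      have hd : m &&& (m - 1) < m := Nat.lt_of_le_of_lt Nat.and_le_right (by omega)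
      have hx : r ^^^ 1 = 1 - r := by interval_cases r <;> decide
      rw [ih _ hd _ (by omega)]
      have hc := countbits_and_pred m h
      rw [hx]
      omega

-- ===== VERDICT (by name: the statement is the Claim_ definition above) =====
theorem evil_spec : Claim_equal_evil := by
  intro n _
  unfold Spec_evil evil evil_alt pvBin
  have hm : (if n ≥ 0 then n else -n).natAbs = n.natAbs := by
    by_cases h : n ≥ 0 <;> simp [h]
  rw [hm]
  have hdrop : ((if n < 0 then ['-', '0', 'b'] else ['0', 'b']) ++
      (if n.natAbs = 0 then ['0'] else pvBinDigits n.natAbs)).drop 2 =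
      (if n < 0 then ['b'] else []) ++ (if n.natAbs = 0 then ['0'] else pvBinDigits n.natAbs) := by
    by_cases h : n < 0 <;> simp [h]
  rw [hdrop, foldl_count_ones]
  have hcount : ((if n < 0 then ['b'] else []) ++
      (if n.natAbs = 0 then ['0'] else pvBinDigits n.natAbs)).count '1'
      = (Nat.bits n.natAbs).count true := by
    by_cases h : n < 0 <;> by_cases hz : n.natAbs = 0 <;>
      simp [h, hz, List.count_append, count_binDigits]
  rw [hcount, kernighan_eq _ 0 (by omega)]
  have h1 : (Nat.bits n.natAbs).count true &&& 1 = (Nat.bits n.natAbs).count true % 2 :=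
    Nat.and_one_is_mod _
  simp only [Nat.zero_add]
  rw [h1]
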